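-- pv_equiv track=rewrite | github.com/rickyhuangjh/Bad-Stock-Exchange | dict_functions.py | insertSortedDict
-- ===== SOURCE A (Python) =====
-- def insertSortedDict(sorted_dict, updateKey, value=1):
--     if updateKey in sorted_dict.keys():
--         sorted_dict[updateKey] += value
--         return sorted_dict
--     else:
--         pairList = []
--         for pair in sorted_dict.items():
--             pairList.append(pair)
--         insertAt = 0
--         for key in sorted_dict.keys():
--             if updateKey < key:
--                 break
--             insertAt += 1
--             if insertAt == len(sorted_dict) +1:
--                 break
--         temp_dict = {}
--         keyIndex = 0
--         while keyIndex < insertAt: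
--             temp_dict.update({pairList[keyIndex][0]: pairList[keyIndex][1]})
--             keyIndex += 1
--         temp_dict.update({updateKey: value})
--         temp_dict.update(sorted_dict)
--         return temp_dict
-- ===== SOURCE B (Python) =====
-- def insertSortedDict(sorted_dict, updateKey, value=1):
--     if updateKey in sorted_dict:
--         sorted_dict[updateKey] += value
--         return sorted_dict
--     result = {}
--     inserted = False
--     for k, v in sorted_dict.items():
--         if not inserted and updateKey < k:
--             result[updateKey] = value
--             inserted = True
--         result[k] = v
--     if not inserted:
--         result[updateKey] = value
--     return result
-- ===== Notes on version B (the rewrite author's own statement) =====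
-- stated objective: simpler
-- what changed: B replaces A's three separate passes (copy items to a list, scan keys for an insertion index, rebuild via a counted while-loop plus a full dict.update) with one single pass over the items that inserts the new key in place using an 'inserted' flag; the increment branch is kept verbatim.
import Mathlib
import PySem

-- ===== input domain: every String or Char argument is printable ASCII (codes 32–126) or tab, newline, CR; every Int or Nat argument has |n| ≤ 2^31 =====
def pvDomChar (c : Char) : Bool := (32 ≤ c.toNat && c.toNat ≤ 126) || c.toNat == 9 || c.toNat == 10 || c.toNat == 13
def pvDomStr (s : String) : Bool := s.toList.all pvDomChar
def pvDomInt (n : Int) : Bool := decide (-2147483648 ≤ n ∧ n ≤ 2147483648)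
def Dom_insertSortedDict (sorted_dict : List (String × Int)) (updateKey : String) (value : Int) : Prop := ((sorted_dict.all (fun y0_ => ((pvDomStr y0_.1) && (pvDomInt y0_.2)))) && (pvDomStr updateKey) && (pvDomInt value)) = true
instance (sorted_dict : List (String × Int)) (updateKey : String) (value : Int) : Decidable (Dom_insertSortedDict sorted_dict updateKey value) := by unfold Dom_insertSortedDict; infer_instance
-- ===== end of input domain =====

-- B is a single pass with an 'inserted' flag instead of A's list copy + index scan + counted rebuild + full dict.update; same return value.

-- ===== PORT A =====
-- 'insertAt = 0; for key in keys: if updateKey < key: break; insertAt += 1; if insertAt == len(sorted_dict)+1: break'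
def pvInsertAtLoop (keys : List String) (updateKey : String) (insertAt : Nat) (sz : Nat) : Nat :=
  match keys with
  | [] => insertAt
  | k :: rest =>
    if updateKey < k then insertAt
    else if insertAt + 1 = sz + 1 then insertAt + 1
    else pvInsertAtLoop rest updateKey (insertAt + 1) sz

-- 'while keyIndex < insertAt: temp_dict.update({pairList[keyIndex][0]: pairList[keyIndex][1]}); keyIndex += 1'
-- pairList[keyIndex] via getD is exact here: the loop only reads keyIndex < insertAt ≤ len(pairList)
def pvCopyLoop (pairList : List (String × Int)) (insertAt keyIndex : Nat)
    (temp_dict : PySem.Dict String Int) : PySem.Dict String Int :=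
  if keyIndex < insertAt then
    pvCopyLoop pairList insertAt (keyIndex + 1)
      (temp_dict.insert (pairList.getD keyIndex ("", 0)).1 (pairList.getD keyIndex ("", 0)).2)
  else temp_dict
termination_by insertAt - keyIndex

def insertSortedDict (sorted_dict : List (String × Int)) (updateKey : String) (value : Int) : List (String × Int) :=
  let d : PySem.Dict String Int := PySem.Dict.mk sorted_dict
  if d.contains updateKey then
    -- 'sorted_dict[updateKey] += value' : the read cannot raise, it is guarded by the membership test
    (d.insert updateKey ((d.get? updateKey).getD 0 + value)).items
  else
    let pairList := d.items.foldl (fun acc pair => acc ++ [pair]) []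
    let insertAt := pvInsertAtLoop d.keys updateKey 0 d.size
    let temp_dict := pvCopyLoop pairList insertAt 0 PySem.Dict.empty
    let temp_dict := temp_dict.insert updateKey value
    (temp_dict.update d.items).items

-- ===== PORT B =====
-- one step of B's single pass: maybe insert (updateKey, value) first, then copy the current pair
def pvInsStep (updateKey : String) (value : Int)
    (acc : PySem.Dict String Int × Bool) (p : String × Int) : PySem.Dict String Int × Bool :=
  let acc' := if !acc.2 && decide (updateKey < p.1) then (acc.1.insert updateKey value, true) else acc
  (acc'.1.insert p.1 p.2, acc'.2)

def insertSortedDict_alt (sorted_dict : List (String × Int)) (updateKey : String) (value : Int) : List (String × Int) :=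
  let d : PySem.Dict String Int := PySem.Dict.mk sorted_dict
  if d.contains updateKey then
    (d.insert updateKey ((d.get? updateKey).getD 0 + value)).items
  else
    let r := d.items.foldl (pvInsStep updateKey value) (PySem.Dict.empty, false)
    (if !r.2 then r.1.insert updateKey value else r.1).items

-- ===== PRECONDITION & SPEC =====
-- Pre_ excludes association lists with duplicate keys: they do not denote any Python dict
-- (dict construction collapses them), so neither behaviour there corresponds to an input of A.
def Pre_insertSortedDict (sorted_dict : List (String × Int)) (updateKey : String) (value : Int) : Prop :=
  (sorted_dict.map Prod.fst).Nodup
instance (sorted_dict : List (String × Int)) (updateKey : String) (value : Int) : Decidable (Pre_insertSortedDict sorted_dict updateKey value) := by unfold Pre_insertSortedDict; infer_instance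

def pvWitness_insertSortedDict : (List (String × Int)) × String × Int := ([("apple", 2), ("cherry", 5)], "banana", 3)

def Spec_insertSortedDict (sorted_dict : List (String × Int)) (updateKey : String) (value : Int) (out : List (String × Int)) : Prop := out = insertSortedDict_alt sorted_dict updateKey value
instance (sorted_dict : List (String × Int)) (updateKey : String) (value : Int) (out : List (String × Int)) : Decidable (Spec_insertSortedDict sorted_dict updateKey value out) := by unfold Spec_insertSortedDict; infer_instance

-- ===== CLAIM (what is proved, stated in full; the proofs are below) =====
def Claim_equal_insertSortedDict : Prop := ∀ (sorted_dict : List (String × Int)) (updateKey : String) (value : Int), Dom_insertSortedDict sorted_dict updateKey value → Pre_insertSortedDict sorted_dict updateKey value → Spec_insertSortedDict sorted_dict updateKey value (insertSortedDict sorted_dict updateKey value)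

-- ===== LEMMAS AND PROOFS =====

theorem pv_insertAtLoop_spec (u : String) : ∀ (ks1 ks2 : List String) (n sz : Nat),
    (∀ k ∈ ks1, ¬ u < k) → (ks2 = [] ∨ ∃ k t, ks2 = k :: t ∧ u < k) →
    n + (ks1 ++ ks2).length ≤ sz →
    pvInsertAtLoop (ks1 ++ ks2) u n sz = n + ks1.length
  | [], ks2, n, sz, _, h2, _ => by
    rcases h2 with rfl | ⟨k, t, rfl, hk⟩
    · simp [pvInsertAtLoop]
    · simp [pvInsertAtLoop, hk]
  | k :: ks1, ks2, n, sz, h1, h2, hsz => by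
    have hk : ¬ u < k := h1 k (by simp)
    have hne : ¬ n + 1 = sz + 1 := by simp at hsz; omega
    have ih := pv_insertAtLoop_spec u ks1 ks2 (n + 1) sz
      (fun k hk => h1 k (by simp [hk])) h2 (by simp at hsz ⊢; omega)
    simp only [List.cons_append, pvInsertAtLoop, if_neg hk, if_neg hne]
    rw [ih]
    simp
    omega

theorem pv_copyLoop_drop : ∀ (p s : List (String × Int)) (i : Nat) (t : PySem.Dict String Int),
    i ≤ p.length → pvCopyLoop (p ++ s) p.length i t = t.update (p.drop i) := by
  intro p s i t hi
  induction h : p.length - i generalizing i t with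
  | zero =>
    have : ¬ i < p.length := by omega
    rw [pvCopyLoop, if_neg this, List.drop_of_length_le (by omega)]
    rfl
  | succ m ih =>
    have hlt : i < p.length := by omega
    rw [pvCopyLoop, if_pos hlt]
    have hget : (p ++ s).getD i ("", 0) = p[i] := by
      rw [List.getD_eq_getElem?_getD, List.getElem?_append_left hlt]
      simp [hlt]
    rw [hget, ih (i+1) _ (by omega) (by omega), List.drop_eq_getElem_cons hlt]
    rfl

theorem pv_insert_noop {d : PySem.Dict String Int} {k : String} {w : Int}
    (hnd : d.keys.Nodup) (h : d.get? k = some w) : d.insert k w = d := by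
  apply PySem.Dict.ext
  have hc : d.contains k = true := by rw [PySem.Dict.contains_eq_isSome_get?, h]; rfl
  rw [PySem.Dict.items_insert_of_contains _ _ hc]
  have : ∀ q ∈ d.items, (if (q.1 == k) = true then (k, w) else q) = q := by
    intro q hq
    by_cases hek : (q.1 == k) = true
    · have : q.1 = k := by simpa using hek
      subst this
      have := PySem.Dict.get?_of_mem_items d (k := q.1) (v := q.2) (by simpa using hq) hnd
      rw [h] at this
      simp at this
      simp [this]
    · simp [hek]
  calc List.map (fun p => if (p.1 == k) = true then (k, w) else p) d.items
      = List.map id d.items := List.map_congr_left (by simpa using this)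
    _ = d.items := List.map_id d.items

theorem pv_update_absorb : ∀ (l : List (String × Int)) (t : PySem.Dict String Int),
    t.keys.Nodup → (∀ q ∈ l, t.get? q.1 = some q.2) → t.update l = t
  | [], t, _, _ => rfl
  | q :: l, t, hnd, h => by
    have h1 : t.insert q.1 q.2 = t := pv_insert_noop hnd (h q (by simp))
    show PySem.Dict.update (t.insert q.1 q.2) l = t
    rw [h1]
    exact pv_update_absorb l t hnd (fun q hq => h q (by simp [hq]))

theorem pv_update_append (d : PySem.Dict String Int) (l1 l2 : List (String × Int)) :
    d.update (l1 ++ l2) = (d.update l1).update l2 := by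
  simp [PySem.Dict.update, List.foldl_append]

theorem pv_update_items_fresh (d : PySem.Dict String Int) (l : List (String × Int))
    (hf : ∀ a ∈ l, d.contains a.1 = false) (hnd : (l.map Prod.fst).Nodup) :
    (d.update l).items = d.items ++ l := by
  have := PySem.Dict.items_foldl_insert_fresh l Prod.fst Prod.snd d hf hnd
  simpa [PySem.Dict.update] using this

theorem pv_foldl_true (u : String) (v : Int) : ∀ (l : List (String × Int)) (t : PySem.Dict String Int),
    l.foldl (pvInsStep u v) (t, true) = (t.update l, true)
  | [], t => rfl
  | q :: l, t => by
    show List.foldl (pvInsStep u v) (pvInsStep u v (t, true) q) l = _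
    have : pvInsStep u v (t, true) q = (t.insert q.1 q.2, true) := by simp [pvInsStep]
    rw [this, pv_foldl_true u v l (t.insert q.1 q.2)]
    rfl

theorem pv_foldl_false (u : String) (v : Int) : ∀ (l : List (String × Int)) (t : PySem.Dict String Int),
    (∀ q ∈ l, ¬ u < q.1) →
    l.foldl (pvInsStep u v) (t, false) = (t.update l, false)
  | [], t, _ => rfl
  | q :: l, t, h => by
    show List.foldl (pvInsStep u v) (pvInsStep u v (t, false) q) l = _
    have : pvInsStep u v (t, false) q = (t.insert q.1 q.2, false) := by
      simp [pvInsStep, h q (by simp)]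
    rw [this, pv_foldl_false u v l (t.insert q.1 q.2) (fun q hq => h q (by simp [hq]))]
    rfl

theorem pv_contains_false_of_not_mem {xs : List (String × Int)} {u : String}
    (h : u ∉ xs.map Prod.fst) : (PySem.Dict.mk xs).contains u = false := by
  rw [Bool.eq_false_iff]
  intro hc
  exact h (by simpa [PySem.Dict.keys] using (PySem.Dict.contains_iff_mem_keys (PySem.Dict.mk xs) u).mp hc)

theorem pv_update_empty_items {l : List (String × Int)} (hnd : (l.map Prod.fst).Nodup) :
    (PySem.Dict.update PySem.Dict.empty l).items = l := by
  have := pv_update_items_fresh PySem.Dict.empty l (by simp [PySem.Dict.contains_empty]) hnd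
  simpa [PySem.Dict.empty] using this

-- A's else branch returns p ++ (u,v) :: s, for the takeWhile/dropWhile split p/s of xs
theorem pv_A_canon (p s : List (String × Int)) (u : String) (v : Int)
    (hnd : ((p ++ s).map Prod.fst).Nodup) (hcu : u ∉ (p ++ s).map Prod.fst)
    (hp : ∀ q ∈ p, ¬ u < q.1) (hs : s = [] ∨ ∃ q t, s = q :: t ∧ u < q.1) :
    insertSortedDict (p ++ s) u v = p ++ (u, v) :: s := by
  have hc := pv_contains_false_of_not_mem hcu
  rw [List.map_append] at hnd hcu
  obtain ⟨hndp, hnds, hdisj⟩ := List.nodup_append.mp hnd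
  rw [insertSortedDict]
  simp only [hc, Bool.false_eq_true, if_false]
  have hkeys : ({ items := p ++ s } : PySem.Dict String Int).keys
      = List.map Prod.fst p ++ List.map Prod.fst s := by
    simp [PySem.Dict.keys]
  have hsize : ({ items := p ++ s } : PySem.Dict String Int).size = (p ++ s).length := by
    simp [PySem.Dict.size]
  rw [PySem.List.foldl_append_singleton, List.nil_append, hkeys, hsize]
  rw [pv_insertAtLoop_spec u (p.map Prod.fst) (s.map Prod.fst) 0 (p ++ s).length
    (by intro k hk; obtain ⟨q, hq, rfl⟩ := List.mem_map.mp hk; exact hp q hq)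
    (by rcases hs with rfl | ⟨q, t, rfl, hq⟩
        · left; rfl
        · right; exact ⟨q.1, t.map Prod.fst, by simp, hq⟩)
    (by simp)]
  have hlen : 0 + (List.map Prod.fst p).length = p.length := by simp
  rw [hlen, pv_copyLoop_drop p s 0 PySem.Dict.empty (Nat.zero_le _), List.drop_zero]
  set e := PySem.Dict.update PySem.Dict.empty p with he_def
  have he : e.items = p := pv_update_empty_items hndp
  have hekeys : e.keys = p.map Prod.fst := by simp [PySem.Dict.keys, he]
  have hceu : e.contains u = false := by
    rw [Bool.eq_false_iff]
    intro hcon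
    have := (PySem.Dict.contains_iff_mem_keys e u).mp hcon
    rw [hekeys] at this
    exact hcu (List.mem_append_left _ this)
  have ht1 : (e.insert u v).items = p ++ [(u, v)] := by
    rw [PySem.Dict.items_insert_of_not_contains e v hceu, he]
  have ht1keys : (e.insert u v).keys = p.map Prod.fst ++ [u] := by
    simp [PySem.Dict.keys, ht1]
  have ht1nd : (e.insert u v).keys.Nodup := by
    rw [ht1keys]
    refine List.nodup_append.mpr ⟨hndp, List.nodup_singleton u, ?_⟩
    intro a ha b hb
    simp at hb
    subst hb
    intro h
    exact hcu (List.mem_append_left _ (h ▸ ha))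
  rw [pv_update_append, pv_update_absorb p (e.insert u v) ht1nd (by
    intro q hq
    refine PySem.Dict.get?_of_mem_items _ ?_ ht1nd
    rw [ht1]
    exact List.mem_append_left _ (by simpa using hq))]
  rw [pv_update_items_fresh (e.insert u v) s (by
    intro a ha
    rw [Bool.eq_false_iff]
    intro hcon
    have := (PySem.Dict.contains_iff_mem_keys _ a.1).mp hcon
    rw [ht1keys] at this
    rcases List.mem_append.mp this with hmem | hmem
    · exact hdisj a.1 hmem a.1 (List.mem_map.mpr ⟨a, ha, rfl⟩) rfl
    · simp at hmem
      exact hcu (List.mem_append_right _ (hmem ▸ List.mem_map.mpr ⟨a, ha, rfl⟩))) hnds]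
  rw [ht1]
  simp

-- B's else branch returns the same list
theorem pv_B_canon (p s : List (String × Int)) (u : String) (v : Int)
    (hnd : ((p ++ s).map Prod.fst).Nodup) (hcu : u ∉ (p ++ s).map Prod.fst)
    (hp : ∀ q ∈ p, ¬ u < q.1) (hs : s = [] ∨ ∃ q t, s = q :: t ∧ u < q.1) :
    insertSortedDict_alt (p ++ s) u v = p ++ (u, v) :: s := by
  have hc := pv_contains_false_of_not_mem hcu
  rw [List.map_append] at hnd hcu
  obtain ⟨hndp, hnds, hdisj⟩ := List.nodup_append.mp hnd
  rw [insertSortedDict_alt]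
  simp only [hc, Bool.false_eq_true, if_false]
  rw [List.foldl_append, pv_foldl_false u v p PySem.Dict.empty hp]
  set e := PySem.Dict.update PySem.Dict.empty p with he_def
  have he : e.items = p := pv_update_empty_items hndp
  have hekeys : e.keys = p.map Prod.fst := by simp [PySem.Dict.keys, he]
  have hceu : e.contains u = false := by
    rw [Bool.eq_false_iff]
    intro hcon
    have := (PySem.Dict.contains_iff_mem_keys e u).mp hcon
    rw [hekeys] at this
    exact hcu (List.mem_append_left _ this)
  have ht1 : (e.insert u v).items = p ++ [(u, v)] := by
    rw [PySem.Dict.items_insert_of_not_contains e v hceu, he]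
  rcases hs with rfl | ⟨q, t, rfl, hq⟩
  · show (e.insert u v).items = p ++ (u, v) :: []
    rw [ht1]
  · rw [List.foldl_cons]
    have hstep : pvInsStep u v (e, false) q = ((e.insert u v).insert q.1 q.2, true) := by
      simp [pvInsStep, hq]
    rw [hstep, pv_foldl_true u v t ((e.insert u v).insert q.1 q.2)]
    simp only [Bool.not_true, Bool.false_eq_true, if_false]
    have hqmem : q.1 ∈ List.map Prod.fst (q :: t) := by simp
    have hqp : q.1 ∉ p.map Prod.fst := fun hmem => hdisj q.1 hmem q.1 hqmem rfl
    have hqu : q.1 ≠ u := by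
      intro h
      rw [h] at hqmem
      exact hcu (List.mem_append_right _ hqmem)
    have ht1keys : (e.insert u v).keys = p.map Prod.fst ++ [u] := by
      simp [PySem.Dict.keys, ht1]
    have hcq : (e.insert u v).contains q.1 = false := by
      rw [Bool.eq_false_iff]
      intro hcon
      have := (PySem.Dict.contains_iff_mem_keys _ q.1).mp hcon
      rw [ht1keys] at this
      rcases List.mem_append.mp this with hmem | hmem
      · exact hqp hmem
      · simp at hmem; exact hqu hmem
    have ht2 : ((e.insert u v).insert q.1 q.2).items = p ++ [(u, v)] ++ [(q.1, q.2)] := by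
      rw [PySem.Dict.items_insert_of_not_contains _ q.2 hcq, ht1]
    have ht2keys : ((e.insert u v).insert q.1 q.2).keys = p.map Prod.fst ++ [u] ++ [q.1] := by
      simp [PySem.Dict.keys, ht2]
    have hndt : (t.map Prod.fst).Nodup := by
      simp at hnds; exact hnds.2
    rw [pv_update_items_fresh ((e.insert u v).insert q.1 q.2) t (by
      intro a ha
      rw [Bool.eq_false_iff]
      intro hcon
      have hmem := (PySem.Dict.contains_iff_mem_keys _ a.1).mp hcon
      rw [ht2keys] at hmem
      have haq : a.1 ∈ (q :: t).map Prod.fst := List.mem_map.mpr ⟨a, by simp [ha], rfl⟩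
      rcases List.mem_append.mp hmem with hmem | hmem
      · rcases List.mem_append.mp hmem with hmem | hmem
        · exact hdisj a.1 hmem a.1 haq rfl
        · simp at hmem
          rw [hmem] at haq
          exact hcu (List.mem_append_right _ haq)
      · simp at hmem
        have hat : a.1 ∈ List.map Prod.fst t := List.mem_map.mpr ⟨a, ha, rfl⟩
        rw [hmem] at hat
        have hnds' : (q.1 :: List.map Prod.fst t).Nodup := by
          rw [List.map_cons] at hnds; exact hnds
        exact (List.nodup_cons.mp hnds').1 hat) hndt]
    rw [ht2]
    simp

theorem pv_main (xs : List (String × Int)) (u : String) (v : Int)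
    (hnd : (xs.map Prod.fst).Nodup) :
    insertSortedDict xs u v = insertSortedDict_alt xs u v := by
  by_cases hc : (PySem.Dict.mk xs).contains u = true
  · rw [insertSortedDict, insertSortedDict_alt]
    simp only [hc, if_true]
  · have hcu : u ∉ xs.map Prod.fst := by
      intro hmem
      exact hc ((PySem.Dict.contains_iff_mem_keys _ u).mpr (by simpa [PySem.Dict.keys] using hmem))
    set P : (String × Int) → Bool := fun q => !(decide (u < q.1)) with hP
    have hsplit : xs.takeWhile P ++ xs.dropWhile P = xs := List.takeWhile_append_dropWhile
    have hp : ∀ q ∈ xs.takeWhile P, ¬ u < q.1 := by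
      intro q hq
      have := List.mem_takeWhile_imp hq
      simpa [hP] using this
    have hs : xs.dropWhile P = [] ∨ ∃ q t, xs.dropWhile P = q :: t ∧ u < q.1 := by
      cases hdw : xs.dropWhile P with
      | nil => exact Or.inl rfl
      | cons q t =>
        refine Or.inr ⟨q, t, rfl, ?_⟩
        have hh := List.head?_dropWhile_not P xs
        rw [hdw] at hh
        simpa [hP] using hh
    rw [← hsplit,
        pv_A_canon _ _ u v (by rw [hsplit]; exact hnd) (by rw [hsplit]; exact hcu) hp hs,
        pv_B_canon _ _ u v (by rw [hsplit]; exact hnd) (by rw [hsplit]; exact hcu) hp hs]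

-- ===== VERDICT (by name: the statement is the Claim_ definition above) =====
theorem insertSortedDict_spec : Claim_equal_insertSortedDict := by
  intro sorted_dict updateKey value _ hpre
  unfold Pre_insertSortedDict at hpre
  unfold Spec_insertSortedDict
  exact pv_main sorted_dict updateKey value hpre
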